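-- pv_equiv track=rewrite | github.com/ez-cdc/dbmazz | e2e/src/ez_cdc_e2e/datasources/wizard.py | _parse_snowflake_url
-- ===== SOURCE A (Python) =====
-- def _parse_snowflake_url(url: str) -> str:
--     """Extract the account identifier portion of a Snowflake URL.
--
--     Handles common shapes:
--         xy12345.us-east-1.snowflakecomputing.com         → xy12345.us-east-1
--         https://xy12345.us-east-1.snowflakecomputing.com → xy12345.us-east-1
--         xy12345.us-east-1.aws.snowflakecomputing.com     → xy12345.us-east-1.aws
--         myorg-myaccount.snowflakecomputing.com           → myorg-myaccount
--         xy12345.snowflakecomputing.com                   → xy12345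
--
--     If the input doesn't look like a Snowflake URL (no
--     .snowflakecomputing.com suffix), returns it unchanged on the assumption
--     that the user already provided a bare identifier.
--     """
--     # Strip protocol if present
--     if url.startswith("http://"):
--         url = url[7:]
--     elif url.startswith("https://"):
--         url = url[8:]
--
--     # Strip path/query/port if present
--     for sep in ("/", "?", "#", ":"):
--         if sep in url:
--             url = url.split(sep, 1)[0]
--
--     # Strip the snowflakecomputing.com suffix
--     suffix = ".snowflakecomputing.com"
--     if url.endswith(suffix):
--         url = url[: -len(suffix)]
--
--     return url
-- ===== SOURCE B (Python) =====
-- def _parse_snowflake_url(url: str) -> str: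
--     host = url.removeprefix("https://") if url.startswith("https://") else url.removeprefix("http://")
--     chars = []
--     for c in host:
--         if c in "/?#:":
--             break
--         chars.append(c)
--     return "".join(chars).removesuffix(".snowflakecomputing.com")
-- ===== Notes on version B (the rewrite author's own statement) =====
-- stated objective: idiomatic
-- what changed: Replaced the protocol-strip chain plus four sequential contains-and-split passes with removeprefix/removesuffix and a single character scan that cuts at the first separator.
import Mathlib
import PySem

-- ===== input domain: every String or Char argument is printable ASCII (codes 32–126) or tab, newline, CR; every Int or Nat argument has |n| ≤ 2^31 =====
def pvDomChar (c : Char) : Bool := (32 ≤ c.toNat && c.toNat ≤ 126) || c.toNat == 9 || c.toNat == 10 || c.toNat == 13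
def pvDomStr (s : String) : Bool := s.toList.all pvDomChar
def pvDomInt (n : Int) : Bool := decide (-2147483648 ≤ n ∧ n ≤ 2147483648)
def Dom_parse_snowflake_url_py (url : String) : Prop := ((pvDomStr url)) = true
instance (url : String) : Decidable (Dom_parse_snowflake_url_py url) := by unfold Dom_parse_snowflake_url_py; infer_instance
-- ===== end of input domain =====

-- B replaces A's protocol-strip chain and four sequential split passes by removeprefix/removesuffix
-- and one character scan cutting at the first separator (idiomatic; same result).

-- ===== PORT A =====
def parse_snowflake_url_py (url : String) : String :=
  let u0 := url.toList
  -- strip protocol if present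
  let u1 := if PySem.Chars.startswith u0 ("http://".toList) then PySem.Chars.slice u0 (some 7) none
    else if PySem.Chars.startswith u0 ("https://".toList) then PySem.Chars.slice u0 (some 8) none
    else u0
  -- for sep in ("/", "?", "#", ":"): if sep in url: url = url.split(sep, 1)[0]
  let u2 := ['/', '?', '#', ':'].foldl (fun u sep =>
      if PySem.Chars.isIn [sep] u then
        -- split with a nonempty sep returns some nonempty list, so the defaults are never used
        ((PySem.Chars.splitMax? u [sep] 1).getD []).headD []
      else u) u1
  -- strip the .snowflakecomputing.com suffix
  let suffix := ".snowflakecomputing.com".toList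
  let u3 := if PySem.Chars.endswith u2 suffix then
      PySem.Chars.slice u2 none (some (-(PySem.Chars.len suffix : Int)))
    else u2
  String.ofList u3

-- ===== PORT B =====
-- B's for-loop with break: copy chars until the first of "/?#:" (membership in the four-char
-- string ported as membership in the four-element char list; exact on these ASCII literals)
def pvScanHost : List Char → List Char
  | [] => []
  | c :: cs => if c ∈ ['/', '?', '#', ':'] then [] else c :: pvScanHost cs

def parse_snowflake_url_py_alt (url : String) : String :=
  let u := url.toList
  -- url.removeprefix("https://") if url.startswith("https://") else url.removeprefix("http://")
  let host := if PySem.Chars.startswith u ("https://".toList) then u.drop 8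
    else if PySem.Chars.startswith u ("http://".toList) then u.drop 7
    else u
  let host := pvScanHost host
  -- "".join(chars).removesuffix(".snowflakecomputing.com")
  let suffix := ".snowflakecomputing.com".toList
  let host := if PySem.Chars.endswith host suffix then host.take (host.length - suffix.length)
    else host
  String.ofList host

-- ===== PRECONDITION & SPEC =====
def Spec_parse_snowflake_url_py (url : String) (out : String) : Prop := out = parse_snowflake_url_py_alt url
instance (url : String) (out : String) : Decidable (Spec_parse_snowflake_url_py url out) := by unfold Spec_parse_snowflake_url_py; infer_instance

-- ===== CLAIM (what is proved, stated in full; the proofs are below) =====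
def Claim_equal_parse_snowflake_url_py : Prop := ∀ (url : String), Dom_parse_snowflake_url_py url → Spec_parse_snowflake_url_py url (parse_snowflake_url_py url)

-- ===== LEMMAS AND PROOFS =====

theorem pv_go_zero (sep : List Char) (fuel : Nat) (l cur : List Char) (acc : List (List Char)) :
    PySem.Chars.splitOnMax.go sep fuel 0 l cur acc = acc.reverse ++ [cur.reverse ++ l] := by
  cases fuel <;> cases l <;> simp [PySem.Chars.splitOnMax.go]

theorem pv_go_one (c : Char) (fuel : Nat) (l cur : List Char) (h : l.length ≤ fuel) :
    (PySem.Chars.splitOnMax.go [c] fuel 1 l cur []).headD []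
      = cur.reverse ++ l.takeWhile (· != c) := by
  induction fuel generalizing l cur with
  | zero =>
    have hl : l = [] := List.eq_nil_of_length_eq_zero (Nat.le_zero.mp h)
    subst hl; simp [PySem.Chars.splitOnMax.go]
  | succ fuel ih =>
    cases l with
    | nil => simp [PySem.Chars.splitOnMax.go]
    | cons c' rest =>
      by_cases hc : c' = c
      · subst hc
        simp [PySem.Chars.splitOnMax.go, List.isPrefixOf, pv_go_zero, List.takeWhile]
      · have hp : [c].isPrefixOf (c' :: rest) = false := by
          simp [List.isPrefixOf]; exact fun h => absurd h.symm hc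
        have hstep : PySem.Chars.splitOnMax.go [c] (fuel + 1) 1 (c' :: rest) cur []
            = PySem.Chars.splitOnMax.go [c] fuel 1 rest (c' :: cur) [] := by
          simp [PySem.Chars.splitOnMax.go, hp]
        rw [hstep, ih rest (c' :: cur) (by simp at h; omega)]
        simp [hc]

theorem pv_stepA (c : Char) (u : List Char) :
    (if PySem.Chars.isIn [c] u then ((PySem.Chars.splitMax? u [c] 1).getD []).headD [] else u)
      = u.takeWhile (· != c) := by
  by_cases hin : PySem.Chars.isIn [c] u
  · rw [if_pos hin, PySem.Chars.splitMax?, if_neg (by simp : ¬(([c] : List Char).isEmpty = true)),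
      Option.getD_some, PySem.Chars.splitOnMax, if_neg (by norm_num : ¬((1 : Int) < 0))]
    simpa using pv_go_one c (u.length + 1) u [] (by omega)
  · have hne : c ∉ u := by
      intro hm
      exact hin ((PySem.Chars.isIn_iff_infix _ _).mpr ((List.singleton_infix_iff c u).mpr hm))
    rw [if_neg hin]
    refine (List.takeWhile_eq_self_iff.mpr ?_).symm
    intro x hx
    simp only [bne_iff_ne, ne_eq]
    exact fun h => hne (h ▸ hx)

theorem pv_scan_eq (l : List Char) :
    pvScanHost l = l.takeWhile (fun c => !(c ∈ ['/', '?', '#', ':'])) := by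
  induction l with
  | nil => rfl
  | cons c cs ih =>
    by_cases h : c ∈ ['/', '?', '#', ':'] <;> simp [pvScanHost, List.takeWhile, h, ih]

theorem pv_chain (v : List Char) :
    ((((v.takeWhile (· != '/')).takeWhile (· != '?')).takeWhile (· != '#')).takeWhile (· != ':'))
      = pvScanHost v := by
  rw [pv_scan_eq]
  simp only [List.takeWhile_takeWhile]
  congr 1
  funext c
  simp only [List.mem_cons, List.not_mem_nil, or_false, bne_iff_ne, ne_eq, decide_eq_true_eq]
  by_cases h1 : c = '/' <;> by_cases h2 : c = '?' <;> by_cases h3 : c = '#' <;> by_cases h4 : c = ':' <;>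
    simp [h1, h2, h3, h4]

theorem pv_no_double_prefix (u : List Char) (h1 : PySem.Chars.startswith u ("http://".toList) = true) :
    PySem.Chars.startswith u ("https://".toList) = false := by
  by_contra h2
  simp only [Bool.not_eq_false] at h2
  rw [PySem.Chars.startswith] at h1 h2
  have p1 : "http://".toList <+: u := List.isPrefixOf_iff_prefix.mp h1
  have p2 : "https://".toList <+: u := List.isPrefixOf_iff_prefix.mp h2
  have := List.prefix_of_prefix_length_le p1 p2 (by decide)
  revert this; decide

-- ===== VERDICT (by name: the statement is the Claim_ definition above) =====
theorem parse_snowflake_url_py_spec : Claim_equal_parse_snowflake_url_py := by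
  intro url _
  unfold Spec_parse_snowflake_url_py
  dsimp only [parse_snowflake_url_py, parse_snowflake_url_py_alt]
  -- protocol strip agrees
  have hproto :
      (if PySem.Chars.startswith url.toList ("http://".toList) then PySem.Chars.slice url.toList (some 7) none
       else if PySem.Chars.startswith url.toList ("https://".toList) then PySem.Chars.slice url.toList (some 8) none
       else url.toList)
      = (if PySem.Chars.startswith url.toList ("https://".toList) then url.toList.drop 8
         else if PySem.Chars.startswith url.toList ("http://".toList) then url.toList.drop 7
         else url.toList) := by
    by_cases h1 : PySem.Chars.startswith url.toList ("http://".toList)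
    · rw [if_pos h1, if_neg (by simpa using pv_no_double_prefix _ h1), if_pos h1,
        PySem.Chars.slice_eq_listSlice, PySem.List.slice_from url.toList (by norm_num : (0:Int) ≤ 7)]
      rfl
    · rw [if_neg h1]
      by_cases h2 : PySem.Chars.startswith url.toList ("https://".toList)
      · rw [if_pos h2, if_pos h2, PySem.Chars.slice_eq_listSlice,
          PySem.List.slice_from url.toList (by norm_num : (0:Int) ≤ 8)]
        rfl
      · rw [if_neg h2, if_neg h2, if_neg h1]
  rw [hproto]
  set v := (if PySem.Chars.startswith url.toList ("https://".toList) then url.toList.drop 8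
    else if PySem.Chars.startswith url.toList ("http://".toList) then url.toList.drop 7
    else url.toList) with hv
  -- the four split passes are one character scan
  have hmid : (['/', '?', '#', ':'].foldl (fun u sep =>
      if PySem.Chars.isIn [sep] u then ((PySem.Chars.splitMax? u [sep] 1).getD []).headD [] else u) v)
      = pvScanHost v := by
    simp only [List.foldl_cons, List.foldl_nil, pv_stepA]
    exact pv_chain v
  rw [hmid]
  set w := pvScanHost v with hw
  -- the suffix strip agrees
  by_cases hs : PySem.Chars.endswith w (".snowflakecomputing.com".toList)
  · have hlen : (".snowflakecomputing.com".toList).length ≤ w.length := by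
      rw [PySem.Chars.endswith] at hs
      exact (List.isSuffixOf_iff_suffix.mp hs).length_le
    rw [if_pos hs, if_pos hs]
    congr 1
    have h23 : (".snowflakecomputing.com".toList).length = 23 := by decide
    rw [h23] at hlen
    simp only [PySem.Chars.slice_eq_listSlice, PySem.List.slice, PySem.List.clampIdx,
      PySem.Chars.len_eq, h23]
    norm_num
    split_ifs with h
    · omega
    · omega
  · rw [if_neg hs, if_neg hs]
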